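-- pv_equiv track=rewrite | github.com/Ai-Whisperers/ultrametric-antigen-AI | research/bioinformatics/codon_encoder_research/neurodegeneration/alzheimers/05_alphafold3_validation_jobs.py | apply_phosphomimic
-- ===== SOURCE A (Python) =====
-- def apply_phosphomimic(sequence: str, positions: list, offset: int = 0) -> str:
--     """
--     Apply S/T→D phosphomimetic mutations at specified positions.
--
--     Args:
--         sequence: Protein sequence
--         positions: List of positions (1-indexed in full tau)
--         offset: Offset to convert full tau positions to sequence positions
--
--     Returns:
--         Modified sequence with S/T replaced by D
--     """
--     seq_list = list(sequence)
--
--     for pos in positions: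
--         seq_pos = pos - 1 - offset  # Convert to 0-indexed in this sequence
--
--         if 0 <= seq_pos < len(seq_list):
--             aa = seq_list[seq_pos]
--             if aa in ['S', 'T']:
--                 seq_list[seq_pos] = 'D'
--             elif aa == 'Y':
--                 seq_list[seq_pos] = 'D'  # Y→D for tyrosine phosphomimetic
--
--     return ''.join(seq_list)
-- ===== SOURCE B (Python) =====
-- def apply_phosphomimic(sequence: str, positions: list, offset: int = 0) -> str:
--     """Apply S/T/Y -> D phosphomimetic mutations at specified positions."""
--     targets = {p - 1 - offset for p in positions}
--     return ''.join('D' if i in targets and aa in 'STY' else aa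
--                    for i, aa in enumerate(sequence))
-- ===== Notes on version B (the rewrite author's own statement) =====
-- stated objective: idiomatic
-- what changed: Inverts the traversal: instead of looping over positions and mutating a char list in place, B precomputes the set of 0-indexed target positions and makes one pass over the sequence with enumerate, replacing S/T/Y at targeted indices.
import Mathlib
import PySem

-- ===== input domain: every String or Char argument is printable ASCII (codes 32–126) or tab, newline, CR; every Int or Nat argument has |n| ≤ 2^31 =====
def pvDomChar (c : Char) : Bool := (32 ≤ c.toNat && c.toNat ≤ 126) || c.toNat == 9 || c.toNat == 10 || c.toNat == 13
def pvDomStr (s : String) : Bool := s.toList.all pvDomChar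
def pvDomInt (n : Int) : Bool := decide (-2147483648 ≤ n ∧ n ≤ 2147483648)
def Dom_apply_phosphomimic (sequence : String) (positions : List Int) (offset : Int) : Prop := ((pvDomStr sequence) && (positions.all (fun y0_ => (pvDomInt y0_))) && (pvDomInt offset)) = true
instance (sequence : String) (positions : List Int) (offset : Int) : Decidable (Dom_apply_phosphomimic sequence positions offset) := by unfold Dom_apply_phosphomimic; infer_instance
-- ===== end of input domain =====

-- B replaces A's position-loop with in-place mutation by a precomputed target-index set and one enumerate pass over the sequence (objective: idiomatic).


-- ===== PORT A =====
-- the body of A's for-loop over positions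
def stepA (offset : Int) (l : List Char) (pos : Int) : List Char :=
  -- seq_pos = pos - 1 - offset; aa = seq_list[seq_pos] (in range by the guard)
  if 0 ≤ pos - 1 - offset ∧ pos - 1 - offset < (l.length : Int) then
    if PySem.List.pyGetD l (pos - 1 - offset) ' ' = 'S' ∨ PySem.List.pyGetD l (pos - 1 - offset) ' ' = 'T' then
      PySem.List.pySetD l (pos - 1 - offset) 'D'
    else if PySem.List.pyGetD l (pos - 1 - offset) ' ' = 'Y' then
      PySem.List.pySetD l (pos - 1 - offset) 'D'
    else l
  else l

def apply_phosphomimic (sequence : String) (positions : List Int) (offset : Int) : String :=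
  String.ofList (positions.foldl (stepA offset) sequence.toList)

-- ===== PORT B =====
def apply_phosphomimic_alt (sequence : String) (positions : List Int) (offset : Int) : String :=
  let targets : PySem.Set Int := PySem.Set.ofList (positions.map (fun p => p - 1 - offset))
  String.ofList ((PySem.List.enumerate sequence.toList 0).map (fun ia =>
    if PySem.Set.contains targets ia.1 ∧ (ia.2 = 'S' ∨ ia.2 = 'T' ∨ ia.2 = 'Y') then 'D' else ia.2))

-- ===== PRECONDITION & SPEC =====
def Spec_apply_phosphomimic (sequence : String) (positions : List Int) (offset : Int) (out : String) : Prop := out = apply_phosphomimic_alt sequence positions offset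
instance (sequence : String) (positions : List Int) (offset : Int) (out : String) : Decidable (Spec_apply_phosphomimic sequence positions offset out) := by unfold Spec_apply_phosphomimic; infer_instance

-- ===== CLAIM (what is proved, stated in full; the proofs are below) =====
def Claim_equal_apply_phosphomimic : Prop := ∀ (sequence : String) (positions : List Int) (offset : Int), Dom_apply_phosphomimic sequence positions offset → Spec_apply_phosphomimic sequence positions offset (apply_phosphomimic sequence positions offset)

-- ===== LEMMAS AND PROOFS =====

lemma length_stepA (offset : Int) (l : List Char) (pos : Int) :
    (stepA offset l pos).length = l.length := by
  unfold stepA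
  split_ifs <;> simp [PySem.List.length_pySetD]

lemma length_foldA (offset : Int) (positions : List Int) (l : List Char) :
    (positions.foldl (stepA offset) l).length = l.length := by
  induction positions generalizing l with
  | nil => rfl
  | cons p ps ih => rw [List.foldl_cons, ih, length_stepA]

lemma getD_stepA (offset pos : Int) (l : List Char) (k : Nat) (hk : k < l.length) :
    (stepA offset l pos).getD k ' ' =
      if pos - 1 - offset = (k : Int) ∧
          (l.getD k ' ' = 'S' ∨ l.getD k ' ' = 'T' ∨ l.getD k ' ' = 'Y') then 'D'
      else l.getD k ' ' := by
  unfold stepA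
  by_cases hg : 0 ≤ pos - 1 - offset ∧ pos - 1 - offset < (l.length : Int)
  · rw [if_pos hg]
    by_cases hhit : pos - 1 - offset = (k : Int)
    · rw [hhit, PySem.List.pyGetD_natCast, PySem.List.pySetD_natCast]
      have hsetk : (l.set k 'D').getD k ' ' = 'D' := by
        rw [List.getD_eq_getElem _ _ (by simpa using hk)]
        exact List.getElem_set_self _
      by_cases hS : l.getD k ' ' = 'S' ∨ l.getD k ' ' = 'T'
      · rw [if_pos hS, hsetk, if_pos ⟨rfl, hS.imp id Or.inl⟩]
      · rw [if_neg hS]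
        by_cases hY : l.getD k ' ' = 'Y'
        · rw [if_pos hY, hsetk, if_pos ⟨rfl, Or.inr (Or.inr hY)⟩]
        · have hc : ¬ ((k : Int) = (k : Int) ∧
              (l.getD k ' ' = 'S' ∨ l.getD k ' ' = 'T' ∨ l.getD k ' ' = 'Y')) := by
            rintro ⟨-, h | h | h⟩ <;> first | exact hS (Or.inl h) | exact hS (Or.inr h) | exact hY h
          rw [if_neg hY, if_neg hc]
    · have hset : ∀ v : Char, (PySem.List.pySetD l (pos - 1 - offset) v).getD k ' ' = l.getD k ' ' := by
        intro v
        rw [PySem.List.pySetD_of_nonneg _ _ hg.1]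
        have hne : (pos - 1 - offset).toNat ≠ k := by omega
        simp [List.getD_eq_getElem?_getD, List.getElem?_set_ne hne]
      have hc : ¬ (pos - 1 - offset = (k : Int) ∧
          (l.getD k ' ' = 'S' ∨ l.getD k ' ' = 'T' ∨ l.getD k ' ' = 'Y')) := fun h => hhit h.1
      rw [if_neg hc]
      split_ifs <;> first | rfl | exact hset 'D'
  · rw [if_neg hg]
    have : ¬ (pos - 1 - offset = (k : Int) ∧
        (l.getD k ' ' = 'S' ∨ l.getD k ' ' = 'T' ∨ l.getD k ' ' = 'Y')) := by
      rintro ⟨h, -⟩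
      exact hg ⟨by omega, by rw [h]; exact_mod_cast hk⟩
    rw [if_neg this]

-- characterisation of A's loop: index k ends as 'D' iff some position targets k and the original char is S/T/Y
lemma getD_foldA (offset : Int) (positions : List Int) (l : List Char) (k : Nat) (hk : k < l.length) :
    (positions.foldl (stepA offset) l).getD k ' ' =
      if (∃ p ∈ positions, p - 1 - offset = (k : Int)) ∧
          (l.getD k ' ' = 'S' ∨ l.getD k ' ' = 'T' ∨ l.getD k ' ' = 'Y') then 'D'
      else l.getD k ' ' := by
  induction positions generalizing l with
  | nil => simp
  | cons p ps ih =>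
    rw [List.foldl_cons, ih _ (by rw [length_stepA]; exact hk), getD_stepA _ _ _ _ hk]
    by_cases hhit : p - 1 - offset = (k : Int)
    · by_cases hsty : l.getD k ' ' = 'S' ∨ l.getD k ' ' = 'T' ∨ l.getD k ' ' = 'Y'
      · have e1 : (if p - 1 - offset = (k : Int) ∧
              (l.getD k ' ' = 'S' ∨ l.getD k ' ' = 'T' ∨ l.getD k ' ' = 'Y') then 'D'
            else l.getD k ' ') = 'D' := if_pos ⟨hhit, hsty⟩
        rw [e1]
        have hD : ¬ (('D' : Char) = 'S' ∨ ('D' : Char) = 'T' ∨ ('D' : Char) = 'Y') := by decide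
        rw [if_neg (fun h => hD h.2), if_pos ⟨⟨p, List.mem_cons_self, hhit⟩, hsty⟩]
      · have e1 : (if p - 1 - offset = (k : Int) ∧
              (l.getD k ' ' = 'S' ∨ l.getD k ' ' = 'T' ∨ l.getD k ' ' = 'Y') then 'D'
            else l.getD k ' ') = l.getD k ' ' := if_neg (fun h => hsty h.2)
        rw [e1, if_neg (fun h => hsty h.2), if_neg (fun h => hsty h.2)]
    · have e1 : (if p - 1 - offset = (k : Int) ∧
            (l.getD k ' ' = 'S' ∨ l.getD k ' ' = 'T' ∨ l.getD k ' ' = 'Y') then 'D'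
          else l.getD k ' ') = l.getD k ' ' := if_neg (fun h => hhit h.1)
      rw [e1]
      have hiff : (∃ q ∈ p :: ps, q - 1 - offset = (k : Int)) ↔
          (∃ q ∈ ps, q - 1 - offset = (k : Int)) := by
        constructor
        · rintro ⟨q, hq, hqe⟩
          rcases List.mem_cons.mp hq with rfl | hq'
          · exact absurd hqe hhit
          · exact ⟨q, hq', hqe⟩
        · rintro ⟨q, hq, hqe⟩; exact ⟨q, List.mem_cons_of_mem _ hq, hqe⟩
      simp only [hiff]

lemma contains_targets (positions : List Int) (offset : Int) (x : Int) :
    PySem.Set.contains (PySem.Set.ofList (positions.map (fun p => p - 1 - offset))) x = true ↔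
      ∃ p ∈ positions, p - 1 - offset = x := by
  simp [PySem.Set.contains, PySem.Set.mem_ofList]

-- ===== VERDICT (by name: the statement is the Claim_ definition above) =====
theorem apply_phosphomimic_spec : Claim_equal_apply_phosphomimic := by
  intro sequence positions offset _
  unfold Spec_apply_phosphomimic apply_phosphomimic apply_phosphomimic_alt
  refine congrArg String.ofList ?_
  apply List.ext_getElem
  · simp [length_foldA, PySem.List.length_enumerate]
  · intro k h1 h2
    have hk : k < sequence.toList.length := by simpa [length_foldA] using h1
    rw [← List.getD_eq_getElem _ ' ' h1, getD_foldA offset positions sequence.toList k hk,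
      List.getElem_map, PySem.List.getElem_enumerate]
    simp only [zero_add]
    rw [← List.getD_eq_getElem _ ' ' hk]
    by_cases hex : ∃ p ∈ positions, p - 1 - offset = (k : Int)
    · by_cases hsty : sequence.toList.getD k ' ' = 'S' ∨ sequence.toList.getD k ' ' = 'T' ∨
          sequence.toList.getD k ' ' = 'Y'
      · rw [if_pos ⟨hex, hsty⟩, if_pos ⟨(contains_targets positions offset _).mpr hex, hsty⟩]
      · rw [if_neg (fun h => hsty h.2), if_neg (fun h => hsty h.2)]
    · rw [if_neg (fun h => hex h.1),
        if_neg (fun h => hex ((contains_targets positions offset _).mp h.1))]
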